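-- pv_equiv track=rewrite | github.com/kkkmin1005/ps | 2108.py | count
-- ===== SOURCE A (Python) =====
-- def count(li):
--     dic = dict()
--     an = []
--
--     for i in li:
--         if i in dic:
--             dic[i] += 1
--         else:
--             dic[i] = 1
--
--     for i in dic:
--         if dic[i] == max(dic.values()):
--             an.append(i)
--
--     an.sort()
--
--     if len(an) >= 2:
--         return an[1]
--     else:
--         return an[0]
-- ===== SOURCE B (Python) =====
-- def count(li):
--     freq = {}
--     for x in li:
--         freq[x] = freq.get(x, 0) + 1
--     mx = max(freq.values())
--     best = None
--     second = None
--     for k, c in freq.items():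
--         if c == mx:
--             if best is None or k < best:
--                 second = best
--                 best = k
--             elif second is None or k < second:
--                 second = k
--     return best if second is None else second
-- ===== Notes on version B (the rewrite author's own statement) =====
-- stated objective: faster
-- what changed: A rescans all dict values with max() for every key and then builds and sorts the tie list; B computes the maximum count once and tracks only the smallest and second-smallest most-frequent keys in a single pass, with no list building and no sort; Pre_ excludes only the empty list, on which both A and B raise.
import Mathlib
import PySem

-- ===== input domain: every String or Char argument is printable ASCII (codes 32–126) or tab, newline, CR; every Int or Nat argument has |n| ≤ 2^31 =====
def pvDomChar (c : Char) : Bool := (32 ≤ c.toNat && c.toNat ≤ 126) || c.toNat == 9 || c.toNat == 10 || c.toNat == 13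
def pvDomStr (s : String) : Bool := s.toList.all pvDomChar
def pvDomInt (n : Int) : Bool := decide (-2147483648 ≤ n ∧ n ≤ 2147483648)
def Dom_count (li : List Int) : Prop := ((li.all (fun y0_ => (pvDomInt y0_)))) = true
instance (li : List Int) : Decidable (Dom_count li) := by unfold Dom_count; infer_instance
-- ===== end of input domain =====

-- B replaces A's per-key max() rescan plus sort-and-index with one max computation and a
-- single two-minimum tracking pass over the keys (objective: faster).

-- ===== PORT A =====
def count (li : List Int) : Int :=
  -- dic = dict(); for i in li: dic[i] += 1 / dic[i] = 1
  let dic := li.foldl (fun d i =>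
    if d.contains i then d.insert i (d.getD i 0 + 1) else d.insert i 1)
    (PySem.Dict.empty : PySem.Dict Int Int)
  -- an = []; for i in dic: if dic[i] == max(dic.values()): an.append(i)
  let an := dic.keys.foldl (fun an i =>
    if dic.getD i 0 = (PySem.List.max? dic.values (fun v => v)).getD 0
    then an ++ [i] else an) []
  -- an.sort()
  let an := PySem.List.sorted an (fun x => x) false
  -- if len(an) >= 2: return an[1] else: return an[0]  (an[0] raises on []: Pre_ excludes li = [])
  if 2 ≤ an.length then PySem.List.pyGetD an 1 0 else PySem.List.pyGetD an 0 0

-- ===== PORT B =====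
def count_alt (li : List Int) : Int :=
  -- freq = {}; for x in li: freq[x] = freq.get(x, 0) + 1
  let freq := li.foldl (fun d x => d.insert x (d.getD x 0 + 1))
    (PySem.Dict.empty : PySem.Dict Int Int)
  -- mx = max(freq.values())   (raises on empty li: Pre_ excludes li = [])
  let mx := (PySem.List.max? freq.values (fun v => v)).getD 0
  -- best = second = None; one pass over freq.items() tracking the two smallest max-count keys
  let p := freq.items.foldl (fun (p : Option Int × Option Int) kc =>
    if kc.2 = mx then
      match p with
      | (none, _) => (some kc.1, none)
      | (some b, s) =>
        if kc.1 < b then (some kc.1, some b)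
        else match s with
             | none => (some b, some kc.1)
             | some sv => if kc.1 < sv then (some b, some kc.1) else (some b, some sv)
    else p) (none, none)
  -- return best if second is None else second  (unreachable fallback 0 when best is None)
  match p with
  | (_, some s) => s
  | (some b, none) => b
  | (none, none) => 0

-- ===== PRECONDITION & SPEC =====
-- Pre_ excludes exactly the empty list, on which A raises IndexError (and B ValueError).
def Pre_count (li : List Int) : Prop := li ≠ []
instance (li : List Int) : Decidable (Pre_count li) := by unfold Pre_count; infer_instance
def pvWitness_count : List Int := [1, 2, 2, 3, 3]

def Spec_count (li : List Int) (out : Int) : Prop := out = count_alt li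
instance (li : List Int) (out : Int) : Decidable (Spec_count li out) := by unfold Spec_count; infer_instance

-- ===== CLAIM (what is proved, stated in full; the proofs are below) =====
def Claim_equal_count : Prop := ∀ (li : List Int), Dom_count li → Pre_count li → Spec_count li (count li)

-- ===== LEMMAS AND PROOFS =====

-- B's two-minimum step, over the bare key (the items pass specialises to it)
def twoMinStep (p : Option Int × Option Int) (x : Int) : Option Int × Option Int :=
  match p with
  | (none, _) => (some x, none)
  | (some b, s) =>
    if x < b then (some x, some b)
    else match s with
         | none => (some b, some x)
         | some sv => if x < sv then (some b, some x) else (some b, some sv)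

-- core lemma: the two-minimum fold computes the first two elements of the sorted list
theorem twoMin_eq_sorted (c : List Int) :
    c.foldl twoMinStep (none, none) =
      ((PySem.List.sorted c (fun x => x) false)[0]?,
       (PySem.List.sorted c (fun x => x) false)[1]?) := by
  induction c using List.reverseRecOn with
  | nil => simp [PySem.List.sorted]
  | append_singleton c x ih =>
    rw [List.foldl_append, List.foldl_cons, List.foldl_nil, ih]
    have hs : ∀ t : List Int, PySem.List.sorted (t ++ [x]) (fun y => y) false =
        PySem.List.insertBy (fun a b => decide (a < b)) x
          (PySem.List.sorted t (fun y => y) false) := by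
      intro t
      rw [PySem.List.sorted_eq_foldl_insertBy, PySem.List.sorted_eq_foldl_insertBy,
        List.foldl_append, List.foldl_cons, List.foldl_nil]
    rw [hs]
    rcases h : PySem.List.sorted c (fun y => y) false with _ | ⟨a, _ | ⟨b, t⟩⟩ <;>
      simp [twoMinStep, PySem.List.insertBy] <;> split_ifs <;> simp_all

-- B's conditional pass over (key, count) pairs is the two-minimum fold over the matching keys
theorem condFold (l : List Int) (f : Int → Int) (M : Int) (p : Option Int × Option Int) :
    (l.map (fun k => (k, f k))).foldl (fun p kc => if kc.2 = M then twoMinStep p kc.1 else p) p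
      = (l.filter (fun k => decide (f k = M))).foldl twoMinStep p := by
  induction l generalizing p with
  | nil => rfl
  | cons hd tl ih => by_cases h : f hd = M <;> simp [h, ih]

theorem count_eq (li : List Int) : count li = count_alt li := by
  unfold count count_alt
  -- the two frequency dicts are equal (A's branch collapses: getD of an absent key is 0)
  have hdic : li.foldl (fun d i =>
      if d.contains i then d.insert i (d.getD i 0 + 1) else d.insert i 1)
      (PySem.Dict.empty : PySem.Dict Int Int)
      = PySem.Dict.counter li := by
    rw [← PySem.Dict.foldl_insert_getD_add_one_eq_counter]
    refine PySem.List.foldl_congr_mem _ _ _ _ (fun d x _ => ?_)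
    by_cases h : d.contains x
    · simp [h]
    · simp [h, PySem.Dict.getD_of_not_contains]
  have hfreq : li.foldl (fun d x => d.insert x (d.getD x 0 + 1))
      (PySem.Dict.empty : PySem.Dict Int Int) = PySem.Dict.counter li :=
    PySem.Dict.foldl_insert_getD_add_one_eq_counter li
  rw [hdic, hfreq]
  have hstep : ∀ (mx : Int), (fun (p : Option Int × Option Int) (kc : Int × Int) =>
      if kc.2 = mx then
        match p with
        | (none, _) => (some kc.1, none)
        | (some b, s) =>
          if kc.1 < b then (some kc.1, some b)
          else match s with
               | none => (some b, some kc.1)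
               | some sv => if kc.1 < sv then (some b, some kc.1) else (some b, some sv)
      else p)
      = (fun p kc => if kc.2 = mx then twoMinStep p kc.1 else p) := fun _ => rfl
  simp only [hstep, PySem.Dict.keys_counter, PySem.Dict.getD_counter,
    PySem.Dict.items_counter, PySem.List.foldl_append_ite_eq_filter, List.nil_append,
    condFold, twoMin_eq_sorted]
  -- both sides now read off the first two elements of the same sorted candidate list
  rcases h : PySem.List.sorted
      ((PySem.Set.ofList li).filter fun k => decide ((li.count k : Int)
        = (PySem.List.max? (PySem.Dict.counter li).values fun v => v).getD 0))
      (fun x => x) false with _ | ⟨a, _ | ⟨b, t⟩⟩ <;>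
    simp_all [PySem.List.pyGetD, PySem.List.pyGet?, PySem.List.pyIdx?]

-- ===== VERDICT (by name: the statement is the Claim_ definition above) =====
theorem count_spec : Claim_equal_count := by
  intro li _ _
  unfold Spec_count
  exact count_eq li
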